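-- pv_equiv track=rewrite | github.com/gabrielhenrique-123/TP-PAA | 1-Sat.py | backtrack
-- ===== SOURCE A (Python) =====
-- def is_satisfied(formula, assignment):
--     """Verifica se a fórmula booleana é satisfeita para uma atribuição dada."""
--     for clause in formula:
--         clause_satisfied = False
--         for i, val in enumerate(clause):
--             if val == 1 and assignment[i] == 1:
--                 clause_satisfied = True
--                 break
--             elif val == 0 and assignment[i] == 0:
--                 clause_satisfied = True
--                 break
--         if not clause_satisfied:
--             return False
--     return True
--
-- def backtrack(formula, assignment, var_count):
--     """Função de Backtracking para encontrar uma solução satisfatória."""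
--     if len(assignment) == var_count:
--         return assignment if is_satisfied(formula, assignment) else None
--
--     # Tentar atribuir 0 e 1 para a próxima variável
--     for value in [0, 1]:
--         result = backtrack(formula, assignment + [value], var_count)
--         if result:
--             return result
--     return None
-- ===== SOURCE B (Python) =====
-- def is_satisfied(formula, assignment):
--     for clause in formula:
--         clause_satisfied = False
--         for i, val in enumerate(clause):
--             if val == 1 and assignment[i] == 1:
--                 clause_satisfied = True
--                 break
--             elif val == 0 and assignment[i] == 0:
--                 clause_satisfied = True
--                 break
--         if not clause_satisfied:
--             return False
--     return True
--
-- def backtrack(formula, assignment, var_count):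
--     # Flat search: the i-th candidate tail is the n-bit binary expansion of i
--     # (MSB first), i.e. the same 0-before-1 lexicographic order as the DFS.
--     n = var_count - len(assignment)
--     for i in range(1 << n):
--         tail = [(i >> (n - 1 - j)) & 1 for j in range(n)]
--         candidate = assignment + tail
--         if is_satisfied(formula, candidate):
--             return candidate
--     return None
-- ===== Notes on version B (the rewrite author's own statement) =====
-- stated objective: simpler
-- what changed: Replaces A's recursive DFS with truthiness-based backtracking by a flat non-recursive loop over a binary counter i in range(1 << n), whose n-bit MSB-first expansion enumerates the candidate tails in the DFS's exact 0-before-1 order; the first satisfying assignment is returned.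
-- outside the precondition, e.g. on backtrack([[1, 1]], [1], 1): A returns [1], B returns [1]
import Mathlib
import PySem

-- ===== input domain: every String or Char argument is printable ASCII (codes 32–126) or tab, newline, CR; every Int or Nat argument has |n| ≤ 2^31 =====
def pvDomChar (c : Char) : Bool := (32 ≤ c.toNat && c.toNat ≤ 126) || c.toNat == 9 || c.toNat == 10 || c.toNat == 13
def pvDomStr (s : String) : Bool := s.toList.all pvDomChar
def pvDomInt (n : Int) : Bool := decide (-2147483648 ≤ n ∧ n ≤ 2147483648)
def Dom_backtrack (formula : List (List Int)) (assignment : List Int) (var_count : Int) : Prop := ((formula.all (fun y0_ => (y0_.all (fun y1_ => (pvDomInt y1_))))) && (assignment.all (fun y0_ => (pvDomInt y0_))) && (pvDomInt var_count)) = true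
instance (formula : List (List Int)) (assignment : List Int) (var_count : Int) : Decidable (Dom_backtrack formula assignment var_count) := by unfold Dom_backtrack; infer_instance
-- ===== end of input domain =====

-- B replaces A's recursive DFS (with truthiness-based backtracking) by a flat loop over a
-- binary counter that enumerates the candidate tails in the same lexicographic order:
-- simpler (no recursion), same cost.

-- ===== PORT A =====
-- shared helper: literal port of is_satisfied (identical in Source A and Source B).
-- assignment[i] out of range raises IndexError in Python (outside Pre_); the
-- default 2 here satisfies neither branch; its value is irrelevant inside Pre_.
def pvSatClause (assignment : List Int) : List Int → Int → Bool
  | [], _ => false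
  | v :: rest, i =>
    let av := (PySem.List.pyGet? assignment i).getD 2
    if v == 1 && av == 1 then true
    else if v == 0 && av == 0 then true
    else pvSatClause assignment rest (i + 1)

def pvIsSat (formula : List (List Int)) (assignment : List Int) : Bool :=
  formula.all (fun c => pvSatClause assignment c 0)

-- Python's `if result:` — truthy iff a non-empty list
def pvTruthy : Option (List Int) → Bool
  | some l => !l.isEmpty
  | none => false

-- fuel = number of variables still to assign; it only makes the recursion total
-- (Python recurses forever when len(assignment) can never reach var_count — outside Pre_)
def pvGoA (formula : List (List Int)) (var_count : Int) : Nat → List Int → Option (List Int)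
  | fuel, assignment =>
    if (assignment.length : Int) = var_count then
      (if pvIsSat formula assignment then some assignment else none)
    else
      match fuel with
      | 0 => none
      | Nat.succ f =>
        let r0 := pvGoA formula var_count f (assignment ++ [0])
        if pvTruthy r0 then r0
        else
          let r1 := pvGoA formula var_count f (assignment ++ [1])
          if pvTruthy r1 then r1 else none

def backtrack (formula : List (List Int)) (assignment : List Int) (var_count : Int) : Option (List Int) :=
  pvGoA formula var_count (var_count - assignment.length).toNat assignment

-- ===== PORT B =====
-- tail = [(i >> (n - 1 - j)) & 1 for j in range(n)]
def pvBits (n i : Nat) : List Int :=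
  (List.range n).map (fun j => (((i >>> (n - 1 - j)) &&& 1 : Nat) : Int))

-- the for-loop of Source B: i counts up, `remaining` is how many loop iterations are left
-- (initially 1 << n), making the recursion total; the loop stops at the first success.
def pvLoopB (formula : List (List Int)) (assignment : List Int) (n : Nat) : Nat → Nat → Option (List Int)
  | 0, _ => none
  | Nat.succ remaining, i =>
    let candidate := assignment ++ pvBits n i
    if pvIsSat formula candidate then some candidate
    else pvLoopB formula assignment n remaining (i + 1)

-- n < 0 (Python: `1 << n` raises ValueError, outside Pre_) is clamped to 0 by toNat.
def backtrack_alt (formula : List (List Int)) (assignment : List Int) (var_count : Int) : Option (List Int) :=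
  let n := (var_count - assignment.length).toNat
  pvLoopB formula assignment n (1 <<< n) 0

-- ===== PRECONDITION & SPEC =====
-- Pre_ excludes: var_count < len(assignment) (A recurses forever), and clauses longer
-- than var_count, on which A's is_satisfied may raise IndexError (though on some such
-- inputs an earlier break lets A return — see the cite; B behaves identically there).
def Pre_backtrack (formula : List (List Int)) (assignment : List Int) (var_count : Int) : Prop :=
  0 ≤ var_count ∧ (assignment.length : Int) ≤ var_count ∧
    ∀ c ∈ formula, (c.length : Int) ≤ var_count
instance (formula : List (List Int)) (assignment : List Int) (var_count : Int) : Decidable (Pre_backtrack formula assignment var_count) := by unfold Pre_backtrack; infer_instance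

def pvWitness_backtrack : List (List Int) × List Int × Int := ([[1]], [], 1)

def Spec_backtrack (formula : List (List Int)) (assignment : List Int) (var_count : Int) (out : Option (List Int)) : Prop := out = backtrack_alt formula assignment var_count
instance (formula : List (List Int)) (assignment : List Int) (var_count : Int) (out : Option (List Int)) : Decidable (Spec_backtrack formula assignment var_count out) := by unfold Spec_backtrack; infer_instance

-- ===== CLAIM (what is proved, stated in full; the proofs are below) =====
def Claim_equal_backtrack : Prop := ∀ (formula : List (List Int)) (assignment : List Int) (var_count : Int), Dom_backtrack formula assignment var_count → Pre_backtrack formula assignment var_count → Spec_backtrack formula assignment var_count (backtrack formula assignment var_count)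

-- ===== LEMMAS AND PROOFS =====

-- proof-side helpers: the list of all n-bit tails in product([0,1], repeat=n) order,
-- and the loop of B re-expressed over an explicit list
def pvProducts : Nat → List (List Int)
  | 0 => [[]]
  | n + 1 => (pvProducts n).map (fun t => 0 :: t) ++ (pvProducts n).map (fun t => 1 :: t)

def pvLoopList (formula : List (List Int)) (assignment : List Int) : List (List Int) → Option (List Int)
  | [] => none
  | t :: rest =>
    let candidate := assignment ++ t
    if pvIsSat formula candidate then some candidate else pvLoopList formula assignment rest

theorem loopList_append (f : List (List Int)) (a : List Int) (l1 l2 : List (List Int)) :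
    pvLoopList f a (l1 ++ l2) =
      match pvLoopList f a l1 with
      | some r => some r
      | none => pvLoopList f a l2 := by
  induction l1 with
  | nil => simp [pvLoopList]
  | cons t rest ih =>
    simp only [List.cons_append, pvLoopList]
    split_ifs <;> simp [ih]

theorem loopList_map_cons (f : List (List Int)) (a : List Int) (c : Int) (ts : List (List Int)) :
    pvLoopList f a (ts.map (fun t => c :: t)) = pvLoopList f (a ++ [c]) ts := by
  induction ts with
  | nil => simp [pvLoopList]
  | cons t rest ih =>
    have hc : a ++ (c :: t) = (a ++ [c]) ++ t := by simp
    simp only [List.map_cons, pvLoopList, ih, hc]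

theorem loopList_some (f : List (List Int)) (a : List Int) (ts : List (List Int)) (r : List Int)
    (h : pvLoopList f a ts = some r) : ∃ t, r = a ++ t := by
  induction ts with
  | nil => simp [pvLoopList] at h
  | cons t rest ih =>
    simp only [pvLoopList] at h
    split_ifs at h with hs
    · exact ⟨t, (Option.some.inj h).symm⟩
    · exact ih h

theorem goA_eq_loopList (f : List (List Int)) (v : Int) (n : Nat) :
    ∀ a : List Int, (a.length : Int) + n = v →
      pvGoA f v n a = pvLoopList f a (pvProducts n) := by
  induction n with
  | zero =>
    intro a h
    simp only [Nat.cast_zero, add_zero] at h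
    simp [pvGoA, h, pvProducts, pvLoopList]
  | succ n ih =>
    intro a h
    have hne : ¬ ((a.length : Int) = v) := by push_cast at h ⊢; omega
    have h0 : ((a ++ [0]).length : Int) + n = v := by simp; push_cast at h ⊢; omega
    have h1 : ((a ++ [1]).length : Int) + n = v := by simp; push_cast at h ⊢; omega
    have e0 := ih (a ++ [0]) h0
    have e1 := ih (a ++ [1]) h1
    simp only [pvGoA, hne, if_false, pvProducts, loopList_append, loopList_map_cons, e0, e1]
    cases hr0 : pvLoopList f (a ++ [0]) (pvProducts n) with
    | some r =>
      obtain ⟨t, rfl⟩ := loopList_some f (a ++ [0]) _ r hr0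
      simp [pvTruthy]
    | none =>
      simp only [pvTruthy, Bool.false_eq_true, if_false]
      cases hr1 : pvLoopList f (a ++ [1]) (pvProducts n) with
      | some r =>
        obtain ⟨t, rfl⟩ := loopList_some f (a ++ [1]) _ r hr1
        simp
      | none => simp

-- (i >>> m) &&& 1 as an arithmetic expression
theorem shift_and_one (i m : Nat) : (i >>> m) &&& 1 = i / 2 ^ m % 2 := by
  rw [Nat.shiftRight_eq_div_pow, Nat.and_one_is_mod]

theorem bit_low (n m k : Nat) (hm : m < n) (_hk : k < 2 ^ n) :
    ((2 ^ n + k) >>> m) &&& 1 = (k >>> m) &&& 1 := by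
  rw [shift_and_one, shift_and_one]
  have hsplit : 2 ^ n = 2 ^ m * 2 ^ (n - m) := by
    rw [← pow_add]; congr 1; omega
  have hdiv : (2 ^ n + k) / 2 ^ m = 2 ^ (n - m) + k / 2 ^ m := by
    rw [hsplit, Nat.mul_add_div (Nat.two_pow_pos m)]
  have he : 2 ^ (n - m) = 2 * 2 ^ (n - m - 1) := by
    rw [← pow_succ']; congr 1; omega
  rw [hdiv, he]; omega

theorem pvBits_succ (n i : Nat) :
    pvBits (n + 1) i = (((i >>> n) &&& 1 : Nat) : Int) :: pvBits n i := by
  simp only [pvBits, List.range_succ_eq_map, List.map_cons, List.map_map]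
  have hh : n + 1 - 1 - 0 = n := by omega
  rw [hh]
  congr 1
  apply List.map_congr_left
  intro j _
  simp only [Function.comp_apply]
  have he : n + 1 - 1 - Nat.succ j = n - 1 - j := by omega
  rw [he]

theorem pvBits_add_pow (n k : Nat) (hk : k < 2 ^ n) : pvBits n (2 ^ n + k) = pvBits n k := by
  simp only [pvBits]
  apply List.map_congr_left
  intro j hj
  rw [List.mem_range] at hj
  rw [bit_low n (n - 1 - j) k (by omega) hk]

theorem head_zero (n i : Nat) (hi : i < 2 ^ n) : (i >>> n) &&& 1 = 0 := by
  rw [shift_and_one, Nat.div_eq_of_lt hi]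

theorem head_one (n k : Nat) (hk : k < 2 ^ n) : ((2 ^ n + k) >>> n) &&& 1 = 1 := by
  rw [shift_and_one]
  have : (2 ^ n + k) / 2 ^ n = 1 := by
    rw [Nat.add_div_left k (Nat.two_pow_pos n), Nat.div_eq_of_lt hk]
  rw [this]

theorem bits_products (n : Nat) :
    (List.range (2 ^ n)).map (pvBits n) = pvProducts n := by
  induction n with
  | zero => simp [pvBits, pvProducts]
  | succ n ih =>
    have hsz : 2 ^ (n + 1) = 2 ^ n + 2 ^ n := by rw [pow_succ]; omega
    rw [hsz, List.range_add, List.map_append, List.map_map, pvProducts]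
    congr 1
    · rw [← ih, List.map_map]
      apply List.map_congr_left
      intro i hi
      rw [List.mem_range] at hi
      simp only [Function.comp_apply, pvBits_succ, head_zero n i hi]
      norm_num
    · rw [← ih, List.map_map]
      apply List.map_congr_left
      intro k hk
      rw [List.mem_range] at hk
      simp only [Function.comp_apply, pvBits_succ, head_one n k hk,
        pvBits_add_pow n k hk]
      norm_num
  
theorem loopB_eq_loopList (f : List (List Int)) (a : List Int) (n : Nat) :
    ∀ (rem i : Nat), pvLoopB f a n rem i = pvLoopList f a ((List.range' i rem).map (pvBits n)) := by
  intro rem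
  induction rem with
  | zero => intro i; simp [pvLoopB, pvLoopList]
  | succ r ih =>
    intro i
    rw [List.range'_succ]
    simp only [pvLoopB, List.map_cons, pvLoopList, ih]

-- ===== VERDICT (by name: the statement is the Claim_ definition above) =====
theorem backtrack_spec : Claim_equal_backtrack := by
  intro formula assignment var_count _ hpre
  obtain ⟨h0, hlen, -⟩ := hpre
  unfold Spec_backtrack backtrack backtrack_alt
  have htn : (((var_count - assignment.length).toNat : Nat) : Int) = var_count - assignment.length :=
    Int.toNat_of_nonneg (by omega)
  rw [loopB_eq_loopList, Nat.shiftLeft_eq, one_mul, ← List.range_eq_range', bits_products]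
  exact goA_eq_loopList formula var_count _ assignment (by omega)
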